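-- pv_equiv track=rewrite | github.com/johnsmithm/ner-accidente | scripts/nlp/pptext.py | change_to_training_format
-- ===== SOURCE A (Python) =====
-- def change_to_training_format(passed_data):
--     last_len = 0
--     position = []
--     entities = []
--
--     for i in passed_data:
--         i_processed = i.replace("||","")
--         if "|" in i:
--             start = last_len
--             finish = last_len + len(i_processed)
--             last_len += len(i_processed) + 1
--
--             entities.append((start, finish, 'LOC_ACCIDENT'))
--             position.append(start)
--             position.append(finish)
--         else:
--             last_len += len(i_processed) + 1
--     return entities
-- ===== SOURCE B (Python) =====
-- def change_to_training_format(passed_data):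
--     def offset(k):
--         return sum(len(s.replace("||", "")) + 1 for s in passed_data[:k])
--     return [(offset(k), offset(k) + len(s.replace("||", "")), 'LOC_ACCIDENT')
--             for k, s in enumerate(passed_data) if '|' in s]
-- ===== Notes on version B (the rewrite author's own statement) =====
-- stated objective: simpler
-- what changed: Removes A's running-offset accumulator entirely: each emitted span's start is recomputed independently as a closed-form prefix sum over the slice passed_data[:k], turning the stateful loop into a stateless comprehension (O(n^2) instead of O(n), traded for brevity).
import Mathlib
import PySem

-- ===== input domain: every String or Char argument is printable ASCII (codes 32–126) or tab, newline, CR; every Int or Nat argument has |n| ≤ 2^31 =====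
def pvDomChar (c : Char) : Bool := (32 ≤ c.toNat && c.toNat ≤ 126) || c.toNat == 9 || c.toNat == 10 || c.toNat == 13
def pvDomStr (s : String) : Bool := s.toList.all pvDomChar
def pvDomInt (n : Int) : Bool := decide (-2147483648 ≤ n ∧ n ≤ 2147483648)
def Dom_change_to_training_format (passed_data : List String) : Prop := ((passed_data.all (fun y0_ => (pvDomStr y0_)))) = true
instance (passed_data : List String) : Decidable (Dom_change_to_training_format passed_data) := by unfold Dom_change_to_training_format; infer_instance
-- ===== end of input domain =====

-- B drops A's running-offset accumulator: each span's start is recomputed independently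
-- as a closed-form prefix sum over the slice passed_data[:k] (stateless, quadratic; simpler).

-- ===== PORT A =====
-- state: (last_len, position, entities), exactly A's three mutable variables
def change_to_training_format (passed_data : List String) : List (Int × Int × String) :=
  (passed_data.foldl
    (fun (st : Int × List Int × List (Int × Int × String)) (i : String) =>
      let i_processed := PySem.Str.replace i "||" ""
      if PySem.Str.isIn "|" i then
        let start := st.1
        let finish := st.1 + PySem.Str.len i_processed
        (st.1 + PySem.Str.len i_processed + 1,
         st.2.1 ++ [start, finish],
         st.2.2 ++ [(start, finish, "LOC_ACCIDENT")])
      else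
        (st.1 + PySem.Str.len i_processed + 1, st.2.1, st.2.2))
    (0, [], [])).2.2

-- ===== PORT B =====
-- helper `offset` of Source B: sum(len(s.replace("||","")) + 1 for s in passed_data[:k])
def altOffset (passed_data : List String) (k : Int) : Int :=
  ((PySem.List.slice passed_data none (some k)).map
    (fun s => PySem.Str.len (PySem.Str.replace s "||" "") + 1)).sum

def change_to_training_format_alt (passed_data : List String) : List (Int × Int × String) :=
  (PySem.List.enumerate passed_data).foldl
    (fun acc t =>
      if PySem.Str.isIn "|" t.2 then
        acc ++ [(altOffset passed_data t.1,
                 altOffset passed_data t.1 + PySem.Str.len (PySem.Str.replace t.2 "||" ""),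
                 "LOC_ACCIDENT")]
      else acc) []

-- ===== PRECONDITION & SPEC =====
def Spec_change_to_training_format (passed_data : List String) (out : List (Int × Int × String)) : Prop := out = change_to_training_format_alt passed_data
instance (passed_data : List String) (out : List (Int × Int × String)) : Decidable (Spec_change_to_training_format passed_data out) := by unfold Spec_change_to_training_format; infer_instance

-- ===== CLAIM =====
def Claim_equal_change_to_training_format : Prop := ∀ (passed_data : List String), Dom_change_to_training_format passed_data → Spec_change_to_training_format passed_data (change_to_training_format passed_data)

-- ===== LEMMAS AND PROOFS =====

-- common reference: the spans of xs when the running offset starts at n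
def pvSpans (n : Int) : List String → List (Int × Int × String)
  | [] => []
  | x :: xs =>
      let L := PySem.Str.len (PySem.Str.replace x "||" "")
      if PySem.Str.isIn "|" x then (n, n + L, "LOC_ACCIDENT") :: pvSpans (n + L + 1) xs
      else pvSpans (n + L + 1) xs

-- A's fold from any state yields its entity accumulator followed by the spans from its offset
theorem pvA_fold (xs : List String) :
    ∀ (n : Int) (pos : List Int) (ents : List (Int × Int × String)),
    (xs.foldl
      (fun (st : Int × List Int × List (Int × Int × String)) (i : String) =>
        let i_processed := PySem.Str.replace i "||" ""
        if PySem.Str.isIn "|" i then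
          let start := st.1
          let finish := st.1 + PySem.Str.len i_processed
          (st.1 + PySem.Str.len i_processed + 1,
           st.2.1 ++ [start, finish],
           st.2.2 ++ [(start, finish, "LOC_ACCIDENT")])
        else
          (st.1 + PySem.Str.len i_processed + 1, st.2.1, st.2.2))
      (n, pos, ents)).2.2 = ents ++ pvSpans n xs := by
  induction xs with
  | nil => intro n pos ents; simp [pvSpans]
  | cons x xs ih =>
      intro n pos ents
      simp only [List.foldl_cons, pvSpans]
      by_cases h : PySem.Str.isIn "|" x
      · rw [if_pos h, if_pos h, ih]; simp
      · rw [if_neg h, if_neg h, ih]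

-- the offset at k+1 extends the offset at k by the k-th segment's contribution
theorem pvOffset_succ (full : List String) (k : Nat) (x : String)
    (hx : full[k]? = some x) :
    altOffset full ((k : Int) + 1)
      = altOffset full (k : Int) + (PySem.Str.len (PySem.Str.replace x "||" "") + 1) := by
  unfold altOffset
  have h1 : ((k : Int) + 1) = ((k + 1 : Nat) : Int) := by push_cast; ring
  rw [h1, PySem.List.slice_to_natCast, PySem.List.slice_to_natCast,
      List.take_add_one, hx]
  simp

-- B's fold over the suffix at index k produces the spans starting at altOffset full k
theorem pvB_fold (full : List String) (xs : List String) :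
    ∀ (k : Nat) (acc : List (Int × Int × String)), full.drop k = xs →
    ((PySem.List.enumerate xs (k : Int)).foldl
      (fun acc t =>
        if PySem.Str.isIn "|" t.2 then
          acc ++ [(altOffset full t.1,
                   altOffset full t.1 + PySem.Str.len (PySem.Str.replace t.2 "||" ""),
                   "LOC_ACCIDENT")]
        else acc) acc) = acc ++ pvSpans (altOffset full (k : Int)) xs := by
  induction xs with
  | nil => intro k acc _; simp [pvSpans, PySem.List.enumerate_nil]
  | cons x xs ih =>
      intro k acc hdrop
      have hx : full[k]? = some x := by
        have hg : (List.drop k full)[0]? = full[k + 0]? := List.getElem?_drop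
        rw [hdrop] at hg
        simpa using hg.symm
      have hdrop' : full.drop (k + 1) = xs := by
        have hg : List.drop 1 (List.drop k full) = List.drop (k + 1) full := List.drop_drop
        rw [hdrop] at hg
        simpa using hg.symm
      rw [PySem.List.enumerate_cons]
      simp only [List.foldl_cons, pvSpans]
      by_cases h : PySem.Str.isIn "|" x
      · rw [if_pos h, if_pos h]
        have h1 : ((k : Int) + 1) = ((k + 1 : Nat) : Int) := by push_cast; ring
        rw [h1, ih (k + 1) _ hdrop', ← h1, pvOffset_succ full k x hx]
        simp [add_assoc]
      · rw [if_neg h, if_neg h]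
        have h1 : ((k : Int) + 1) = ((k + 1 : Nat) : Int) := by push_cast; ring
        rw [h1, ih (k + 1) _ hdrop', ← h1, pvOffset_succ full k x hx]
        simp [add_assoc]

-- ===== VERDICT =====
theorem change_to_training_format_spec : Claim_equal_change_to_training_format := by
  intro passed_data _
  unfold Spec_change_to_training_format
  simp only [change_to_training_format, change_to_training_format_alt]
  rw [pvA_fold]
  have h0 : (0 : Int) = ((0 : Nat) : Int) := by norm_num
  rw [show (PySem.List.enumerate passed_data) = PySem.List.enumerate passed_data ((0 : Nat) : Int) by norm_num,
      pvB_fold passed_data passed_data 0 [] (by simp)]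
  have : altOffset passed_data ((0 : Nat) : Int) = 0 := by
    unfold altOffset
    rw [PySem.List.slice_to_natCast]
    simp
  rw [this]
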